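-- pv_equiv track=rewrite | github.com/ll7/robot_sf_ll7 | scripts/tools/fill_docstring_placeholders.py | describe_snake
-- ===== SOURCE A (Python) =====
-- WORD_MAP = {
--     "acc": "acceleration",
--     "algo": "algorithm",
--     "cfg": "config",
--     "cfgs": "configs",
--     "dens": "density",
--     "dir": "directory",
--     "dirs": "directories",
--     "dt": "time step",
--     "env": "environment",
--     "envs": "environments",
--     "goal": "goal",
--     "hist": "history",
--     "info": "info",
--     "map": "map",
--     "param": "parameter",
--     "params": "parameters",
--     "ped": "pedestrian",
--     "peds": "pedestrians",
--     "pos": "position",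
--     "traj": "trajectory",
--     "vel": "velocity",
-- }
--
-- def humanize_snake(token: str) -> str:
--     """Convert a ``snake_case`` token into a readable string.
--
--     Args:
--         token: Source token using underscores to separate words.
--
--     Returns:
--         str: Human-friendly phrase with underscores removed and common
--             abbreviations expanded.
--     """
--
--     parts = [WORD_MAP.get(part, part) for part in token.split("_") if part]
--     return " ".join(parts)
--
-- def describe_snake(token: str) -> str | None:
--     """Describe snake_case tokens with contextual templates.
--
--     Args:
--         token: snake_case token.
--
--     Returns:
--         str | None: Human-readable description or ``None`` if heuristics do
--         not match.
--     """
--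
--     lower = token.lower()
--     if lower.startswith("num_"):
--         base = humanize_snake(token[4:])
--         return f"number of {base}".strip()
--     for suffix, template in (
--         ("_traj", "trajectory of {base}"),
--         ("_positions", "positions for {base}"),
--         ("_position", "position for {base}"),
--         ("_pos", "position for {base}"),
--         ("_vel", "velocity for {base}"),
--         ("_acc", "acceleration for {base}"),
--         ("_goal", "goal for {base}"),
--         ("_start", "start value for {base}"),
--         ("_path", "filesystem path for the {base}"),
--         ("_dir", "directory for {base}"),
--         ("_ids", "identifiers for {base}"),
--         ("_id", "identifier for {base}"),
--         ("_name", "name of {base}"),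
--         ("_names", "names of {base}"),
--         ("_seed", "random seed for {base}"),
--         ("_weights", "weights for {base}"),
--         ("_baseline", "baseline data for {base}"),
--         ("_count", "count of {base}"),
--     ):
--         if lower.endswith(suffix):
--             base = token[: -len(suffix)] or suffix.removeprefix("_")
--             human = humanize_snake(base)
--             return template.format(base=human or suffix.strip("_")).strip()
--     human = humanize_snake(token)
--     return human or None
-- ===== SOURCE B (Python) =====
-- WORD_MAP = {
--     "acc": "acceleration",
--     "algo": "algorithm",
--     "cfg": "config",
--     "cfgs": "configs",
--     "dens": "density",
--     "dir": "directory",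
--     "dirs": "directories",
--     "dt": "time step",
--     "env": "environment",
--     "envs": "environments",
--     "goal": "goal",
--     "hist": "history",
--     "info": "info",
--     "map": "map",
--     "param": "parameter",
--     "params": "parameters",
--     "ped": "pedestrian",
--     "peds": "pedestrians",
--     "pos": "position",
--     "traj": "trajectory",
--     "vel": "velocity",
-- }
--
-- # Phrase per final suffix word (no underscore, no "{base}" placeholder):
-- # the description is phrase + " " + base.
-- SUFFIX_PHRASES = {
--     "traj": "trajectory of",
--     "positions": "positions for",
--     "position": "position for",
--     "pos": "position for",
--     "vel": "velocity for",
--     "acc": "acceleration for",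
--     "goal": "goal for",
--     "start": "start value for",
--     "path": "filesystem path for the",
--     "dir": "directory for",
--     "ids": "identifiers for",
--     "id": "identifier for",
--     "name": "name of",
--     "names": "names of",
--     "seed": "random seed for",
--     "weights": "weights for",
--     "baseline": "baseline data for",
--     "count": "count of",
-- }
--
--
-- def humanize_snake(token: str) -> str:
--     """Expand abbreviations and replace underscores with spaces."""
--     return " ".join(WORD_MAP.get(part, part) for part in token.split("_") if part)
--
--
-- def describe_snake(token: str) -> str | None:
--     """Describe snake_case tokens by splitting once at the LAST underscore and
--     looking the final word up in a phrase table (no ordered endswith scan)."""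
--     lower = token.lower()
--     if lower.startswith("num_"):
--         return ("number of " + humanize_snake(token[4:])).strip()
--     head, sep, last = token.rpartition("_")
--     if sep:
--         key = last.lower()
--         phrase = SUFFIX_PHRASES.get(key)
--         if phrase is not None:
--             human = humanize_snake(head or key)
--             return (phrase + " " + (human or key)).strip()
--     return humanize_snake(token) or None
-- ===== Notes on version B (the rewrite author's own statement) =====
-- stated objective: simpler
-- what changed: Replaces the ordered 18-way endswith scan and template formatting with one rpartition at the last underscore, an O(1) phrase-table lookup of the lowercased final word, and plain space-joined concatenation of phrase and base.
import Mathlib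
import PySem

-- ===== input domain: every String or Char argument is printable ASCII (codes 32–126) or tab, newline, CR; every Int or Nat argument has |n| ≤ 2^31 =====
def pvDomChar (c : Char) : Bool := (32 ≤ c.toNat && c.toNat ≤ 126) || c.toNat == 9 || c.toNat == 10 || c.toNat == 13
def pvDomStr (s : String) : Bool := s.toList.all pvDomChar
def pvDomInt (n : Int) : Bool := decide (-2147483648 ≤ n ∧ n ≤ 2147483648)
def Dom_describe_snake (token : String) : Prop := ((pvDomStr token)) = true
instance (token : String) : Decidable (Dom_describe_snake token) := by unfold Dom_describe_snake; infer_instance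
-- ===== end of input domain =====

-- B replaces A's ordered 18-way endswith scan by one rpartition at the last underscore
-- plus a single lookup of the lowercased final word in a phrase table; the description
-- is rebuilt as phrase + " " + base instead of template formatting (objective: simpler).
-- A's string literals are ported as explicit Char lists; B's tables are String pairs
-- converted by .toList; '{…} of {base}'.format(base=x) in A is ported as list append
-- since every template ends in '{base}'.

-- ===== PORT A =====
-- WORD_MAP, as A's humanize_snake uses it
def wordMap : PySem.Dict (List Char) (List Char) := ⟨[
  (['a', 'c', 'c'], ['a', 'c', 'c', 'e', 'l', 'e', 'r', 'a', 't', 'i', 'o', 'n']),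
  (['a', 'l', 'g', 'o'], ['a', 'l', 'g', 'o', 'r', 'i', 't', 'h', 'm']),
  (['c', 'f', 'g'], ['c', 'o', 'n', 'f', 'i', 'g']),
  (['c', 'f', 'g', 's'], ['c', 'o', 'n', 'f', 'i', 'g', 's']),
  (['d', 'e', 'n', 's'], ['d', 'e', 'n', 's', 'i', 't', 'y']),
  (['d', 'i', 'r'], ['d', 'i', 'r', 'e', 'c', 't', 'o', 'r', 'y']),
  (['d', 'i', 'r', 's'], ['d', 'i', 'r', 'e', 'c', 't', 'o', 'r', 'i', 'e', 's']),
  (['d', 't'], ['t', 'i', 'm', 'e', ' ', 's', 't', 'e', 'p']),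
  (['e', 'n', 'v'], ['e', 'n', 'v', 'i', 'r', 'o', 'n', 'm', 'e', 'n', 't']),
  (['e', 'n', 'v', 's'], ['e', 'n', 'v', 'i', 'r', 'o', 'n', 'm', 'e', 'n', 't', 's']),
  (['g', 'o', 'a', 'l'], ['g', 'o', 'a', 'l']),
  (['h', 'i', 's', 't'], ['h', 'i', 's', 't', 'o', 'r', 'y']),
  (['i', 'n', 'f', 'o'], ['i', 'n', 'f', 'o']),
  (['m', 'a', 'p'], ['m', 'a', 'p']),
  (['p', 'a', 'r', 'a', 'm'], ['p', 'a', 'r', 'a', 'm', 'e', 't', 'e', 'r']),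
  (['p', 'a', 'r', 'a', 'm', 's'], ['p', 'a', 'r', 'a', 'm', 'e', 't', 'e', 'r', 's']),
  (['p', 'e', 'd'], ['p', 'e', 'd', 'e', 's', 't', 'r', 'i', 'a', 'n']),
  (['p', 'e', 'd', 's'], ['p', 'e', 'd', 'e', 's', 't', 'r', 'i', 'a', 'n', 's']),
  (['p', 'o', 's'], ['p', 'o', 's', 'i', 't', 'i', 'o', 'n']),
  (['t', 'r', 'a', 'j'], ['t', 'r', 'a', 'j', 'e', 'c', 't', 'o', 'r', 'y']),
  (['v', 'e', 'l'], ['v', 'e', 'l', 'o', 'c', 'i', 't', 'y'])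
]⟩

-- humanize_snake as written in Source A: split on '_', drop empties, map WORD_MAP, join
def humanizeC (l : List Char) : List Char :=
  PySem.Chars.join [' '] (((PySem.Chars.splitOn l ['_']).filter (fun p => !(p.isEmpty))).map (fun p => wordMap.getD p p))

-- token[: -len(suffix)] or suffix.removeprefix("_")   (removeprefix ported by hand, exact)
def baseOf (l suf : List Char) : List Char :=
  if PySem.List.slice l none (some (-(suf.length : Int))) = [] then
    (if PySem.Chars.startswith suf ['_'] then suf.drop 1 else suf)
  else PySem.List.slice l none (some (-(suf.length : Int)))

-- A's ordered (suffix, template-prefix) tuple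
def suffixPairs : List (List Char × List Char) := [
  (['_', 't', 'r', 'a', 'j'], ['t', 'r', 'a', 'j', 'e', 'c', 't', 'o', 'r', 'y', ' ', 'o', 'f', ' ']),
  (['_', 'p', 'o', 's', 'i', 't', 'i', 'o', 'n', 's'], ['p', 'o', 's', 'i', 't', 'i', 'o', 'n', 's', ' ', 'f', 'o', 'r', ' ']),
  (['_', 'p', 'o', 's', 'i', 't', 'i', 'o', 'n'], ['p', 'o', 's', 'i', 't', 'i', 'o', 'n', ' ', 'f', 'o', 'r', ' ']),
  (['_', 'p', 'o', 's'], ['p', 'o', 's', 'i', 't', 'i', 'o', 'n', ' ', 'f', 'o', 'r', ' ']),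
  (['_', 'v', 'e', 'l'], ['v', 'e', 'l', 'o', 'c', 'i', 't', 'y', ' ', 'f', 'o', 'r', ' ']),
  (['_', 'a', 'c', 'c'], ['a', 'c', 'c', 'e', 'l', 'e', 'r', 'a', 't', 'i', 'o', 'n', ' ', 'f', 'o', 'r', ' ']),
  (['_', 'g', 'o', 'a', 'l'], ['g', 'o', 'a', 'l', ' ', 'f', 'o', 'r', ' ']),
  (['_', 's', 't', 'a', 'r', 't'], ['s', 't', 'a', 'r', 't', ' ', 'v', 'a', 'l', 'u', 'e', ' ', 'f', 'o', 'r', ' ']),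
  (['_', 'p', 'a', 't', 'h'], ['f', 'i', 'l', 'e', 's', 'y', 's', 't', 'e', 'm', ' ', 'p', 'a', 't', 'h', ' ', 'f', 'o', 'r', ' ', 't', 'h', 'e', ' ']),
  (['_', 'd', 'i', 'r'], ['d', 'i', 'r', 'e', 'c', 't', 'o', 'r', 'y', ' ', 'f', 'o', 'r', ' ']),
  (['_', 'i', 'd', 's'], ['i', 'd', 'e', 'n', 't', 'i', 'f', 'i', 'e', 'r', 's', ' ', 'f', 'o', 'r', ' ']),
  (['_', 'i', 'd'], ['i', 'd', 'e', 'n', 't', 'i', 'f', 'i', 'e', 'r', ' ', 'f', 'o', 'r', ' ']),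
  (['_', 'n', 'a', 'm', 'e'], ['n', 'a', 'm', 'e', ' ', 'o', 'f', ' ']),
  (['_', 'n', 'a', 'm', 'e', 's'], ['n', 'a', 'm', 'e', 's', ' ', 'o', 'f', ' ']),
  (['_', 's', 'e', 'e', 'd'], ['r', 'a', 'n', 'd', 'o', 'm', ' ', 's', 'e', 'e', 'd', ' ', 'f', 'o', 'r', ' ']),
  (['_', 'w', 'e', 'i', 'g', 'h', 't', 's'], ['w', 'e', 'i', 'g', 'h', 't', 's', ' ', 'f', 'o', 'r', ' ']),
  (['_', 'b', 'a', 's', 'e', 'l', 'i', 'n', 'e'], ['b', 'a', 's', 'e', 'l', 'i', 'n', 'e', ' ', 'd', 'a', 't', 'a', ' ', 'f', 'o', 'r', ' ']),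
  (['_', 'c', 'o', 'u', 'n', 't'], ['c', 'o', 'u', 'n', 't', ' ', 'o', 'f', ' '])
]

-- A's for-loop over the suffix tuple: first match wins
def scanA (l low : List Char) : List (List Char × List Char) → Option (List Char)
  | [] => none
  | (suf, pre) :: rest =>
    if PySem.Chars.endswith low suf then
      some (PySem.Chars.strip (pre ++
        (if humanizeC (baseOf l suf) = [] then PySem.Chars.stripChars suf ['_'] else humanizeC (baseOf l suf))))
    else scanA l low rest

def describe_snake (token : String) : Option String :=
  if PySem.Chars.startswith (PySem.Chars.lower token.toList) ['n', 'u', 'm', '_'] then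
    some (String.ofList (PySem.Chars.strip (['n', 'u', 'm', 'b', 'e', 'r', ' ', 'o', 'f', ' '] ++ humanizeC (PySem.List.slice token.toList (some 4) none))))
  else
    match scanA token.toList (PySem.Chars.lower token.toList) suffixPairs with
    | some r => some (String.ofList r)
    | none => if humanizeC token.toList = [] then none else some (String.ofList (humanizeC token.toList))

-- ===== PORT B =====
-- B's WORD_MAP, kept as readable string pairs and converted once
def wordPairsB : List (String × String) := [("acc", "acceleration"), ("algo", "algorithm"), ("cfg", "config"), ("cfgs", "configs"), ("dens", "density"), ("dir", "directory"), ("dirs", "directories"), ("dt", "time step"), ("env", "environment"), ("envs", "environments"), ("goal", "goal"), ("hist", "history"), ("info", "info"), ("map", "map"), ("param", "parameter"), ("params", "parameters"), ("ped", "pedestrian"), ("peds", "pedestrians"), ("pos", "position"), ("traj", "trajectory"), ("vel", "velocity")]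

def wordMapB : PySem.Dict (List Char) (List Char) := ⟨wordPairsB.map (fun p => (p.1.toList, p.2.toList))⟩

-- Source B's humanize_snake (same module helper), over B's table
def humanizeB (l : List Char) : List Char :=
  PySem.Chars.join " ".toList (((PySem.Chars.splitOn l "_".toList).filter (fun p => !(p.isEmpty))).map (fun p => wordMapB.getD p p))

-- SUFFIX_PHRASES: final word (no underscore) → phrase (no placeholder)
def phrasePairsB : List (String × String) := [("traj", "trajectory of"), ("positions", "positions for"), ("position", "position for"), ("pos", "position for"), ("vel", "velocity for"), ("acc", "acceleration for"), ("goal", "goal for"), ("start", "start value for"), ("path", "filesystem path for the"), ("dir", "directory for"), ("ids", "identifiers for"), ("id", "identifier for"), ("name", "name of"), ("names", "names of"), ("seed", "random seed for"), ("weights", "weights for"), ("baseline", "baseline data for"), ("count", "count of")]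

def suffixPhrases : PySem.Dict (List Char) (List Char) := ⟨phrasePairsB.map (fun p => (p.1.toList, p.2.toList))⟩

-- hand port of token.rpartition("_"): some (head, last) iff an underscore exists
def rpart : List Char → Option (List Char × List Char)
  | [] => none
  | c :: rest =>
    match rpart rest with
    | some (h, t) => some (c :: h, t)
    | none => if c = '_' then some ([], rest) else none

-- shared fall-through: humanize_snake(token) or None
def fallbackB (cs : List Char) : Option String :=
  if humanizeB cs = [] then none else some (String.ofList (humanizeB cs))

def describe_snake_alt (token : String) : Option String :=
  if PySem.Chars.startswith (PySem.Chars.lower token.toList) "num_".toList then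
    some (String.ofList (PySem.Chars.strip ("number of ".toList ++ humanizeB (PySem.List.slice token.toList (some 4) none))))
  else
    match rpart token.toList with
    | some (h, t) =>
      match PySem.Dict.get? suffixPhrases (PySem.Chars.lower t) with
      | some phrase =>
        some (String.ofList (PySem.Chars.strip (phrase ++ " ".toList ++
          (if humanizeB (if h = [] then PySem.Chars.lower t else h) = [] then PySem.Chars.lower t
           else humanizeB (if h = [] then PySem.Chars.lower t else h)))))
      | none => fallbackB token.toList
    | none => fallbackB token.toList

-- ===== PRECONDITION & SPEC =====
def Spec_describe_snake (token : String) (out : Option String) : Prop := out = describe_snake_alt token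
instance (token : String) (out : Option String) : Decidable (Spec_describe_snake token out) := by unfold Spec_describe_snake; infer_instance

-- ===== CLAIM (what is proved, stated in full; the proofs are below) =====
def Claim_equal_describe_snake : Prop := ∀ (token : String), Dom_describe_snake token → Spec_describe_snake token (describe_snake token)

-- ===== LEMMAS AND PROOFS =====

-- B's tables coincide with A's entry for entry
theorem wordMapB_eq : wordMapB = wordMap := PySem.Dict.ext (by decide)

theorem humB_eq (l : List Char) : humanizeB l = humanizeC l := by
  have h1 : (" ".toList : List Char) = [' '] := by decide
  have h2 : ("_".toList : List Char) = ['_'] := by decide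
  simp [humanizeB, humanizeC, wordMapB_eq, h1, h2]

theorem lowerChar_underscore (c : Char) : PySem.Chars.lowerChar c = '_' ↔ c = '_' := by
  unfold PySem.Chars.lowerChar
  split_ifs with h
  · simp only [PySem.Chars.isupper, Bool.and_eq_true, decide_eq_true_eq] at h
    constructor
    · intro he
      exfalso
      have h2 : c.toNat ≤ 90 := h.2
      have h1 : 65 ≤ c.toNat := h.1
      have he' := congrArg Char.toNat he
      rw [Char.toNat_ofNat] at he'
      rw [if_pos (Or.inl (by omega))] at he'
      have : ('_' : Char).toNat = 95 := rfl
      omega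
    · intro he; subst he; exact absurd h (by decide)
  · exact Iff.rfl

theorem mem_lower_underscore (t : List Char) : '_' ∈ PySem.Chars.lower t ↔ '_' ∈ t := by
  simp [PySem.Chars.lower, lowerChar_underscore]

theorem rpart_eq_none_iff (l : List Char) : rpart l = none ↔ '_' ∉ l := by
  induction l with
  | nil => simp [rpart]
  | cons c rest ih =>
    rcases hre : rpart rest with _ | ⟨h, t⟩
    · rw [hre] at ih
      by_cases hc : c = '_' <;> simp [rpart, hre, hc, ih.mp rfl] <;>
        first | exact Ne.symm hc | rfl
    · have : '_' ∈ c :: rest := by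
        rcases (not_iff_not.mpr ih).mp (by simp [hre]) with h'
        exact List.mem_cons_of_mem _ (not_not.mp h')
      simp [rpart, hre, this]

theorem rpart_some_spec (l : List Char) : ∀ h t, rpart l = some (h, t) →
    l = h ++ '_' :: t ∧ '_' ∉ t := by
  induction l with
  | nil => intro h t hr; simp [rpart] at hr
  | cons c rest ih =>
    intro h t hr
    simp only [rpart] at hr
    rcases hre : rpart rest with _ | ⟨h', t'⟩ <;> simp only [hre] at hr
    · by_cases hc : c = '_'
      · rw [if_pos hc] at hr
        cases hr
        exact ⟨by simp [hc], (rpart_eq_none_iff rest).mp hre⟩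
      · rw [if_neg hc] at hr; cases hr
    · cases hr
      obtain ⟨he, hn⟩ := ih _ _ hre
      exact ⟨by rw [he]; rfl, hn⟩

theorem suffix_underscore (w t h' : List Char) (hw : '_' ∉ w) (ht : '_' ∉ t) :
    ('_' :: w) <:+ (h' ++ '_' :: t) ↔ w = t := by
  constructor
  · intro hsuf
    have h2 : ('_' :: t) <:+ (h' ++ '_' :: t) := List.suffix_append h' _
    rcases List.suffix_or_suffix_of_suffix hsuf h2 with hc | hc
    · rcases List.suffix_cons_iff.mp hc with he | hc'
      · exact (List.cons.injEq _ _ _ _ ▸ he).2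
      · exact absurd (hc'.subset (List.mem_cons_self)) ht
    · rcases List.suffix_cons_iff.mp hc with he | hc'
      · exact ((List.cons.injEq _ _ _ _ ▸ he).2).symm
      · exact absurd (hc'.subset (List.mem_cons_self)) hw
  · rintro rfl
    exact List.suffix_append h' _

theorem endswith_rpart {l h t : List Char} (w : List Char) (hw : '_' ∉ w)
    (hr : rpart l = some (h, t)) :
    PySem.Chars.endswith (PySem.Chars.lower l) ('_' :: w) = decide (PySem.Chars.lower t = w) := by
  obtain ⟨rfl, ht⟩ := rpart_some_spec l h t hr
  have hlc : PySem.Chars.lowerChar '_' = '_' := by decide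
  have hmap : PySem.Chars.lower (h ++ '_' :: t)
      = PySem.Chars.lower h ++ '_' :: PySem.Chars.lower t := by
    simp [PySem.Chars.lower, hlc]
  have ht' : '_' ∉ PySem.Chars.lower t := by rw [mem_lower_underscore]; exact ht
  have hiff : (PySem.Chars.endswith (PySem.Chars.lower (h ++ '_' :: t)) ('_' :: w) = true)
      ↔ PySem.Chars.lower t = w := by
    rw [PySem.Chars.endswith_iff, hmap]
    rw [suffix_underscore w (PySem.Chars.lower t) (PySem.Chars.lower h) hw ht']
    exact eq_comm
  by_cases hd : PySem.Chars.lower t = w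
  · rw [hiff.mpr hd]; simp [hd]
  · have hf : PySem.Chars.endswith (PySem.Chars.lower (h ++ '_' :: t)) ('_' :: w) = false := by
      rw [← Bool.not_eq_true]; exact fun hc => hd (hiff.mp hc)
    rw [hf]; simp [hd]

theorem endswith_no_underscore (l : List Char) (hl : '_' ∉ l) (w : List Char) :
    PySem.Chars.endswith (PySem.Chars.lower l) ('_' :: w) = false := by
  rw [← Bool.not_eq_true, PySem.Chars.endswith_iff]
  intro hc
  exact hl ((mem_lower_underscore l).mp (hc.subset (List.mem_cons_self)))

theorem slice_head (l h t : List Char) (hl : l = h ++ '_' :: t) (j : Int)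
    (hj : j = -((t.length : Int) + 1)) : PySem.List.slice l none (some j) = h := by
  subst hl
  subst hj
  have hcast : (-(((t.length : Int)) + 1)) = -(((t.length + 1 : Nat) : Int)) := by push_cast; ring
  rw [hcast, PySem.List.slice_to_neg_natCast _ _ (by omega)]
  have h2 : (h ++ '_' :: t).length - (t.length + 1) = h.length := by
    simp [List.length_append]
  rw [h2]
  exact List.take_left

theorem describe_main (token : String) : describe_snake token = describe_snake_alt token := by
  have hsp : (" ".toList : List Char) = [' '] := by decide
  have hnum : ("num_".toList : List Char) = ['n', 'u', 'm', '_'] := by decide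
  have hnof : ("number of ".toList : List Char) = ['n', 'u', 'm', 'b', 'e', 'r', ' ', 'o', 'f', ' '] := by decide
  unfold describe_snake describe_snake_alt
  rw [hnum, hnof]
  by_cases hn : PySem.Chars.startswith (PySem.Chars.lower token.toList) ['n', 'u', 'm', '_'] = true
  · simp [hn, humB_eq]
  · rw [Bool.not_eq_true] at hn
    simp only [hn, Bool.false_eq_true, if_false]
    rcases hr : rpart token.toList with _ | ⟨h, t⟩
    · have hl : '_' ∉ token.toList := (rpart_eq_none_iff _).mp hr
      have hscan : scanA token.toList (PySem.Chars.lower token.toList) suffixPairs = none := by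
        simp [scanA, suffixPairs, endswith_no_underscore _ hl]
      rw [hscan]
      simp [fallbackB, humB_eq]
    · obtain ⟨hl_eq, ht⟩ := rpart_some_spec _ _ _ hr
      have e1 := endswith_rpart (w := (['t', 'r', 'a', 'j'] : List Char)) (by decide) hr
      have e2 := endswith_rpart (w := (['p', 'o', 's', 'i', 't', 'i', 'o', 'n', 's'] : List Char)) (by decide) hr
      have e3 := endswith_rpart (w := (['p', 'o', 's', 'i', 't', 'i', 'o', 'n'] : List Char)) (by decide) hr
      have e4 := endswith_rpart (w := (['p', 'o', 's'] : List Char)) (by decide) hr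
      have e5 := endswith_rpart (w := (['v', 'e', 'l'] : List Char)) (by decide) hr
      have e6 := endswith_rpart (w := (['a', 'c', 'c'] : List Char)) (by decide) hr
      have e7 := endswith_rpart (w := (['g', 'o', 'a', 'l'] : List Char)) (by decide) hr
      have e8 := endswith_rpart (w := (['s', 't', 'a', 'r', 't'] : List Char)) (by decide) hr
      have e9 := endswith_rpart (w := (['p', 'a', 't', 'h'] : List Char)) (by decide) hr
      have e10 := endswith_rpart (w := (['d', 'i', 'r'] : List Char)) (by decide) hr
      have e11 := endswith_rpart (w := (['i', 'd', 's'] : List Char)) (by decide) hr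
      have e12 := endswith_rpart (w := (['i', 'd'] : List Char)) (by decide) hr
      have e13 := endswith_rpart (w := (['n', 'a', 'm', 'e'] : List Char)) (by decide) hr
      have e14 := endswith_rpart (w := (['n', 'a', 'm', 'e', 's'] : List Char)) (by decide) hr
      have e15 := endswith_rpart (w := (['s', 'e', 'e', 'd'] : List Char)) (by decide) hr
      have e16 := endswith_rpart (w := (['w', 'e', 'i', 'g', 'h', 't', 's'] : List Char)) (by decide) hr
      have e17 := endswith_rpart (w := (['b', 'a', 's', 'e', 'l', 'i', 'n', 'e'] : List Char)) (by decide) hr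
      have e18 := endswith_rpart (w := (['c', 'o', 'u', 'n', 't'] : List Char)) (by decide) hr
      simp only [scanA, suffixPairs, e1, e2, e3, e4, e5, e6, e7, e8, e9, e10, e11, e12, e13, e14, e15, e16, e17, e18]
      by_cases kw1 : PySem.Chars.lower t = (['t', 'r', 'a', 'j'] : List Char)
      · rw [kw1]
        have hlen : t.length = 4 := by simpa [PySem.Chars.lower] using congrArg List.length kw1
        have hs : PySem.List.slice token.toList none (some (-(((['_', 't', 'r', 'a', 'j'] : List Char).length : Int)))) = h :=
          slice_head _ _ _ hl_eq _ (by rw [hlen]; decide)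
        have hb : baseOf token.toList (['_', 't', 'r', 'a', 'j'] : List Char) = (if h = [] then (['t', 'r', 'a', 'j'] : List Char) else h) := by
          unfold baseOf
          rw [hs]
          by_cases hh : h = [] <;> simp [hh] <;> try decide
        have hst : PySem.Chars.stripChars (['_', 't', 'r', 'a', 'j'] : List Char) ['_'] = (['t', 'r', 'a', 'j'] : List Char) := by decide
        have hg : PySem.Dict.get? suffixPhrases (['t', 'r', 'a', 'j'] : List Char) = some ("trajectory of".toList) := by decide
        simp [hb, hst, hg, hsp, humB_eq]
      by_cases kw2 : PySem.Chars.lower t = (['p', 'o', 's', 'i', 't', 'i', 'o', 'n', 's'] : List Char)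
      · rw [kw2]
        have hlen : t.length = 9 := by simpa [PySem.Chars.lower] using congrArg List.length kw2
        have hs : PySem.List.slice token.toList none (some (-(((['_', 'p', 'o', 's', 'i', 't', 'i', 'o', 'n', 's'] : List Char).length : Int)))) = h :=
          slice_head _ _ _ hl_eq _ (by rw [hlen]; decide)
        have hb : baseOf token.toList (['_', 'p', 'o', 's', 'i', 't', 'i', 'o', 'n', 's'] : List Char) = (if h = [] then (['p', 'o', 's', 'i', 't', 'i', 'o', 'n', 's'] : List Char) else h) := by
          unfold baseOf
          rw [hs]
          by_cases hh : h = [] <;> simp [hh] <;> try decide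
        have hst : PySem.Chars.stripChars (['_', 'p', 'o', 's', 'i', 't', 'i', 'o', 'n', 's'] : List Char) ['_'] = (['p', 'o', 's', 'i', 't', 'i', 'o', 'n', 's'] : List Char) := by decide
        have hg : PySem.Dict.get? suffixPhrases (['p', 'o', 's', 'i', 't', 'i', 'o', 'n', 's'] : List Char) = some ("positions for".toList) := by decide
        simp [hb, hst, hg, hsp, humB_eq]
      by_cases kw3 : PySem.Chars.lower t = (['p', 'o', 's', 'i', 't', 'i', 'o', 'n'] : List Char)
      · rw [kw3]
        have hlen : t.length = 8 := by simpa [PySem.Chars.lower] using congrArg List.length kw3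
        have hs : PySem.List.slice token.toList none (some (-(((['_', 'p', 'o', 's', 'i', 't', 'i', 'o', 'n'] : List Char).length : Int)))) = h :=
          slice_head _ _ _ hl_eq _ (by rw [hlen]; decide)
        have hb : baseOf token.toList (['_', 'p', 'o', 's', 'i', 't', 'i', 'o', 'n'] : List Char) = (if h = [] then (['p', 'o', 's', 'i', 't', 'i', 'o', 'n'] : List Char) else h) := by
          unfold baseOf
          rw [hs]
          by_cases hh : h = [] <;> simp [hh] <;> try decide
        have hst : PySem.Chars.stripChars (['_', 'p', 'o', 's', 'i', 't', 'i', 'o', 'n'] : List Char) ['_'] = (['p', 'o', 's', 'i', 't', 'i', 'o', 'n'] : List Char) := by decide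
        have hg : PySem.Dict.get? suffixPhrases (['p', 'o', 's', 'i', 't', 'i', 'o', 'n'] : List Char) = some ("position for".toList) := by decide
        simp [hb, hst, hg, hsp, humB_eq]
      by_cases kw4 : PySem.Chars.lower t = (['p', 'o', 's'] : List Char)
      · rw [kw4]
        have hlen : t.length = 3 := by simpa [PySem.Chars.lower] using congrArg List.length kw4
        have hs : PySem.List.slice token.toList none (some (-(((['_', 'p', 'o', 's'] : List Char).length : Int)))) = h :=
          slice_head _ _ _ hl_eq _ (by rw [hlen]; decide)
        have hb : baseOf token.toList (['_', 'p', 'o', 's'] : List Char) = (if h = [] then (['p', 'o', 's'] : List Char) else h) := by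
          unfold baseOf
          rw [hs]
          by_cases hh : h = [] <;> simp [hh] <;> try decide
        have hst : PySem.Chars.stripChars (['_', 'p', 'o', 's'] : List Char) ['_'] = (['p', 'o', 's'] : List Char) := by decide
        have hg : PySem.Dict.get? suffixPhrases (['p', 'o', 's'] : List Char) = some ("position for".toList) := by decide
        simp [hb, hst, hg, hsp, humB_eq]
      by_cases kw5 : PySem.Chars.lower t = (['v', 'e', 'l'] : List Char)
      · rw [kw5]
        have hlen : t.length = 3 := by simpa [PySem.Chars.lower] using congrArg List.length kw5
        have hs : PySem.List.slice token.toList none (some (-(((['_', 'v', 'e', 'l'] : List Char).length : Int)))) = h :=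
          slice_head _ _ _ hl_eq _ (by rw [hlen]; decide)
        have hb : baseOf token.toList (['_', 'v', 'e', 'l'] : List Char) = (if h = [] then (['v', 'e', 'l'] : List Char) else h) := by
          unfold baseOf
          rw [hs]
          by_cases hh : h = [] <;> simp [hh] <;> try decide
        have hst : PySem.Chars.stripChars (['_', 'v', 'e', 'l'] : List Char) ['_'] = (['v', 'e', 'l'] : List Char) := by decide
        have hg : PySem.Dict.get? suffixPhrases (['v', 'e', 'l'] : List Char) = some ("velocity for".toList) := by decide
        simp [hb, hst, hg, hsp, humB_eq]
      by_cases kw6 : PySem.Chars.lower t = (['a', 'c', 'c'] : List Char)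
      · rw [kw6]
        have hlen : t.length = 3 := by simpa [PySem.Chars.lower] using congrArg List.length kw6
        have hs : PySem.List.slice token.toList none (some (-(((['_', 'a', 'c', 'c'] : List Char).length : Int)))) = h :=
          slice_head _ _ _ hl_eq _ (by rw [hlen]; decide)
        have hb : baseOf token.toList (['_', 'a', 'c', 'c'] : List Char) = (if h = [] then (['a', 'c', 'c'] : List Char) else h) := by
          unfold baseOf
          rw [hs]
          by_cases hh : h = [] <;> simp [hh] <;> try decide
        have hst : PySem.Chars.stripChars (['_', 'a', 'c', 'c'] : List Char) ['_'] = (['a', 'c', 'c'] : List Char) := by decide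
        have hg : PySem.Dict.get? suffixPhrases (['a', 'c', 'c'] : List Char) = some ("acceleration for".toList) := by decide
        simp [hb, hst, hg, hsp, humB_eq]
      by_cases kw7 : PySem.Chars.lower t = (['g', 'o', 'a', 'l'] : List Char)
      · rw [kw7]
        have hlen : t.length = 4 := by simpa [PySem.Chars.lower] using congrArg List.length kw7
        have hs : PySem.List.slice token.toList none (some (-(((['_', 'g', 'o', 'a', 'l'] : List Char).length : Int)))) = h :=
          slice_head _ _ _ hl_eq _ (by rw [hlen]; decide)
        have hb : baseOf token.toList (['_', 'g', 'o', 'a', 'l'] : List Char) = (if h = [] then (['g', 'o', 'a', 'l'] : List Char) else h) := by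
          unfold baseOf
          rw [hs]
          by_cases hh : h = [] <;> simp [hh] <;> try decide
        have hst : PySem.Chars.stripChars (['_', 'g', 'o', 'a', 'l'] : List Char) ['_'] = (['g', 'o', 'a', 'l'] : List Char) := by decide
        have hg : PySem.Dict.get? suffixPhrases (['g', 'o', 'a', 'l'] : List Char) = some ("goal for".toList) := by decide
        simp [hb, hst, hg, hsp, humB_eq]
      by_cases kw8 : PySem.Chars.lower t = (['s', 't', 'a', 'r', 't'] : List Char)
      · rw [kw8]
        have hlen : t.length = 5 := by simpa [PySem.Chars.lower] using congrArg List.length kw8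
        have hs : PySem.List.slice token.toList none (some (-(((['_', 's', 't', 'a', 'r', 't'] : List Char).length : Int)))) = h :=
          slice_head _ _ _ hl_eq _ (by rw [hlen]; decide)
        have hb : baseOf token.toList (['_', 's', 't', 'a', 'r', 't'] : List Char) = (if h = [] then (['s', 't', 'a', 'r', 't'] : List Char) else h) := by
          unfold baseOf
          rw [hs]
          by_cases hh : h = [] <;> simp [hh] <;> try decide
        have hst : PySem.Chars.stripChars (['_', 's', 't', 'a', 'r', 't'] : List Char) ['_'] = (['s', 't', 'a', 'r', 't'] : List Char) := by decide
        have hg : PySem.Dict.get? suffixPhrases (['s', 't', 'a', 'r', 't'] : List Char) = some ("start value for".toList) := by decide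
        simp [hb, hst, hg, hsp, humB_eq]
      by_cases kw9 : PySem.Chars.lower t = (['p', 'a', 't', 'h'] : List Char)
      · rw [kw9]
        have hlen : t.length = 4 := by simpa [PySem.Chars.lower] using congrArg List.length kw9
        have hs : PySem.List.slice token.toList none (some (-(((['_', 'p', 'a', 't', 'h'] : List Char).length : Int)))) = h :=
          slice_head _ _ _ hl_eq _ (by rw [hlen]; decide)
        have hb : baseOf token.toList (['_', 'p', 'a', 't', 'h'] : List Char) = (if h = [] then (['p', 'a', 't', 'h'] : List Char) else h) := by
          unfold baseOf
          rw [hs]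
          by_cases hh : h = [] <;> simp [hh] <;> try decide
        have hst : PySem.Chars.stripChars (['_', 'p', 'a', 't', 'h'] : List Char) ['_'] = (['p', 'a', 't', 'h'] : List Char) := by decide
        have hg : PySem.Dict.get? suffixPhrases (['p', 'a', 't', 'h'] : List Char) = some ("filesystem path for the".toList) := by decide
        simp [hb, hst, hg, hsp, humB_eq]
      by_cases kw10 : PySem.Chars.lower t = (['d', 'i', 'r'] : List Char)
      · rw [kw10]
        have hlen : t.length = 3 := by simpa [PySem.Chars.lower] using congrArg List.length kw10
        have hs : PySem.List.slice token.toList none (some (-(((['_', 'd', 'i', 'r'] : List Char).length : Int)))) = h :=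
          slice_head _ _ _ hl_eq _ (by rw [hlen]; decide)
        have hb : baseOf token.toList (['_', 'd', 'i', 'r'] : List Char) = (if h = [] then (['d', 'i', 'r'] : List Char) else h) := by
          unfold baseOf
          rw [hs]
          by_cases hh : h = [] <;> simp [hh] <;> try decide
        have hst : PySem.Chars.stripChars (['_', 'd', 'i', 'r'] : List Char) ['_'] = (['d', 'i', 'r'] : List Char) := by decide
        have hg : PySem.Dict.get? suffixPhrases (['d', 'i', 'r'] : List Char) = some ("directory for".toList) := by decide
        simp [hb, hst, hg, hsp, humB_eq]
      by_cases kw11 : PySem.Chars.lower t = (['i', 'd', 's'] : List Char)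
      · rw [kw11]
        have hlen : t.length = 3 := by simpa [PySem.Chars.lower] using congrArg List.length kw11
        have hs : PySem.List.slice token.toList none (some (-(((['_', 'i', 'd', 's'] : List Char).length : Int)))) = h :=
          slice_head _ _ _ hl_eq _ (by rw [hlen]; decide)
        have hb : baseOf token.toList (['_', 'i', 'd', 's'] : List Char) = (if h = [] then (['i', 'd', 's'] : List Char) else h) := by
          unfold baseOf
          rw [hs]
          by_cases hh : h = [] <;> simp [hh] <;> try decide
        have hst : PySem.Chars.stripChars (['_', 'i', 'd', 's'] : List Char) ['_'] = (['i', 'd', 's'] : List Char) := by decide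
        have hg : PySem.Dict.get? suffixPhrases (['i', 'd', 's'] : List Char) = some ("identifiers for".toList) := by decide
        simp [hb, hst, hg, hsp, humB_eq]
      by_cases kw12 : PySem.Chars.lower t = (['i', 'd'] : List Char)
      · rw [kw12]
        have hlen : t.length = 2 := by simpa [PySem.Chars.lower] using congrArg List.length kw12
        have hs : PySem.List.slice token.toList none (some (-(((['_', 'i', 'd'] : List Char).length : Int)))) = h :=
          slice_head _ _ _ hl_eq _ (by rw [hlen]; decide)
        have hb : baseOf token.toList (['_', 'i', 'd'] : List Char) = (if h = [] then (['i', 'd'] : List Char) else h) := by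
          unfold baseOf
          rw [hs]
          by_cases hh : h = [] <;> simp [hh] <;> try decide
        have hst : PySem.Chars.stripChars (['_', 'i', 'd'] : List Char) ['_'] = (['i', 'd'] : List Char) := by decide
        have hg : PySem.Dict.get? suffixPhrases (['i', 'd'] : List Char) = some ("identifier for".toList) := by decide
        simp [hb, hst, hg, hsp, humB_eq]
      by_cases kw13 : PySem.Chars.lower t = (['n', 'a', 'm', 'e'] : List Char)
      · rw [kw13]
        have hlen : t.length = 4 := by simpa [PySem.Chars.lower] using congrArg List.length kw13
        have hs : PySem.List.slice token.toList none (some (-(((['_', 'n', 'a', 'm', 'e'] : List Char).length : Int)))) = h :=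
          slice_head _ _ _ hl_eq _ (by rw [hlen]; decide)
        have hb : baseOf token.toList (['_', 'n', 'a', 'm', 'e'] : List Char) = (if h = [] then (['n', 'a', 'm', 'e'] : List Char) else h) := by
          unfold baseOf
          rw [hs]
          by_cases hh : h = [] <;> simp [hh] <;> try decide
        have hst : PySem.Chars.stripChars (['_', 'n', 'a', 'm', 'e'] : List Char) ['_'] = (['n', 'a', 'm', 'e'] : List Char) := by decide
        have hg : PySem.Dict.get? suffixPhrases (['n', 'a', 'm', 'e'] : List Char) = some ("name of".toList) := by decide
        simp [hb, hst, hg, hsp, humB_eq]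
      by_cases kw14 : PySem.Chars.lower t = (['n', 'a', 'm', 'e', 's'] : List Char)
      · rw [kw14]
        have hlen : t.length = 5 := by simpa [PySem.Chars.lower] using congrArg List.length kw14
        have hs : PySem.List.slice token.toList none (some (-(((['_', 'n', 'a', 'm', 'e', 's'] : List Char).length : Int)))) = h :=
          slice_head _ _ _ hl_eq _ (by rw [hlen]; decide)
        have hb : baseOf token.toList (['_', 'n', 'a', 'm', 'e', 's'] : List Char) = (if h = [] then (['n', 'a', 'm', 'e', 's'] : List Char) else h) := by
          unfold baseOf
          rw [hs]
          by_cases hh : h = [] <;> simp [hh] <;> try decide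
        have hst : PySem.Chars.stripChars (['_', 'n', 'a', 'm', 'e', 's'] : List Char) ['_'] = (['n', 'a', 'm', 'e', 's'] : List Char) := by decide
        have hg : PySem.Dict.get? suffixPhrases (['n', 'a', 'm', 'e', 's'] : List Char) = some ("names of".toList) := by decide
        simp [hb, hst, hg, hsp, humB_eq]
      by_cases kw15 : PySem.Chars.lower t = (['s', 'e', 'e', 'd'] : List Char)
      · rw [kw15]
        have hlen : t.length = 4 := by simpa [PySem.Chars.lower] using congrArg List.length kw15
        have hs : PySem.List.slice token.toList none (some (-(((['_', 's', 'e', 'e', 'd'] : List Char).length : Int)))) = h :=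
          slice_head _ _ _ hl_eq _ (by rw [hlen]; decide)
        have hb : baseOf token.toList (['_', 's', 'e', 'e', 'd'] : List Char) = (if h = [] then (['s', 'e', 'e', 'd'] : List Char) else h) := by
          unfold baseOf
          rw [hs]
          by_cases hh : h = [] <;> simp [hh] <;> try decide
        have hst : PySem.Chars.stripChars (['_', 's', 'e', 'e', 'd'] : List Char) ['_'] = (['s', 'e', 'e', 'd'] : List Char) := by decide
        have hg : PySem.Dict.get? suffixPhrases (['s', 'e', 'e', 'd'] : List Char) = some ("random seed for".toList) := by decide
        simp [hb, hst, hg, hsp, humB_eq]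
      by_cases kw16 : PySem.Chars.lower t = (['w', 'e', 'i', 'g', 'h', 't', 's'] : List Char)
      · rw [kw16]
        have hlen : t.length = 7 := by simpa [PySem.Chars.lower] using congrArg List.length kw16
        have hs : PySem.List.slice token.toList none (some (-(((['_', 'w', 'e', 'i', 'g', 'h', 't', 's'] : List Char).length : Int)))) = h :=
          slice_head _ _ _ hl_eq _ (by rw [hlen]; decide)
        have hb : baseOf token.toList (['_', 'w', 'e', 'i', 'g', 'h', 't', 's'] : List Char) = (if h = [] then (['w', 'e', 'i', 'g', 'h', 't', 's'] : List Char) else h) := by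
          unfold baseOf
          rw [hs]
          by_cases hh : h = [] <;> simp [hh] <;> try decide
        have hst : PySem.Chars.stripChars (['_', 'w', 'e', 'i', 'g', 'h', 't', 's'] : List Char) ['_'] = (['w', 'e', 'i', 'g', 'h', 't', 's'] : List Char) := by decide
        have hg : PySem.Dict.get? suffixPhrases (['w', 'e', 'i', 'g', 'h', 't', 's'] : List Char) = some ("weights for".toList) := by decide
        simp [hb, hst, hg, hsp, humB_eq]
      by_cases kw17 : PySem.Chars.lower t = (['b', 'a', 's', 'e', 'l', 'i', 'n', 'e'] : List Char)
      · rw [kw17]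
        have hlen : t.length = 8 := by simpa [PySem.Chars.lower] using congrArg List.length kw17
        have hs : PySem.List.slice token.toList none (some (-(((['_', 'b', 'a', 's', 'e', 'l', 'i', 'n', 'e'] : List Char).length : Int)))) = h :=
          slice_head _ _ _ hl_eq _ (by rw [hlen]; decide)
        have hb : baseOf token.toList (['_', 'b', 'a', 's', 'e', 'l', 'i', 'n', 'e'] : List Char) = (if h = [] then (['b', 'a', 's', 'e', 'l', 'i', 'n', 'e'] : List Char) else h) := by
          unfold baseOf
          rw [hs]
          by_cases hh : h = [] <;> simp [hh] <;> try decide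
        have hst : PySem.Chars.stripChars (['_', 'b', 'a', 's', 'e', 'l', 'i', 'n', 'e'] : List Char) ['_'] = (['b', 'a', 's', 'e', 'l', 'i', 'n', 'e'] : List Char) := by decide
        have hg : PySem.Dict.get? suffixPhrases (['b', 'a', 's', 'e', 'l', 'i', 'n', 'e'] : List Char) = some ("baseline data for".toList) := by decide
        simp [hb, hst, hg, hsp, humB_eq]
      by_cases kw18 : PySem.Chars.lower t = (['c', 'o', 'u', 'n', 't'] : List Char)
      · rw [kw18]
        have hlen : t.length = 5 := by simpa [PySem.Chars.lower] using congrArg List.length kw18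
        have hs : PySem.List.slice token.toList none (some (-(((['_', 'c', 'o', 'u', 'n', 't'] : List Char).length : Int)))) = h :=
          slice_head _ _ _ hl_eq _ (by rw [hlen]; decide)
        have hb : baseOf token.toList (['_', 'c', 'o', 'u', 'n', 't'] : List Char) = (if h = [] then (['c', 'o', 'u', 'n', 't'] : List Char) else h) := by
          unfold baseOf
          rw [hs]
          by_cases hh : h = [] <;> simp [hh] <;> try decide
        have hst : PySem.Chars.stripChars (['_', 'c', 'o', 'u', 'n', 't'] : List Char) ['_'] = (['c', 'o', 'u', 'n', 't'] : List Char) := by decide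
        have hg : PySem.Dict.get? suffixPhrases (['c', 'o', 'u', 'n', 't'] : List Char) = some ("count of".toList) := by decide
        simp [hb, hst, hg, hsp, humB_eq]
      have hS : suffixPhrases = PySem.Dict.mk [(['t', 'r', 'a', 'j'], ['t', 'r', 'a', 'j', 'e', 'c', 't', 'o', 'r', 'y', ' ', 'o', 'f']), (['p', 'o', 's', 'i', 't', 'i', 'o', 'n', 's'], ['p', 'o', 's', 'i', 't', 'i', 'o', 'n', 's', ' ', 'f', 'o', 'r']), (['p', 'o', 's', 'i', 't', 'i', 'o', 'n'], ['p', 'o', 's', 'i', 't', 'i', 'o', 'n', ' ', 'f', 'o', 'r']), (['p', 'o', 's'], ['p', 'o', 's', 'i', 't', 'i', 'o', 'n', ' ', 'f', 'o', 'r']), (['v', 'e', 'l'], ['v', 'e', 'l', 'o', 'c', 'i', 't', 'y', ' ', 'f', 'o', 'r']), (['a', 'c', 'c'], ['a', 'c', 'c', 'e', 'l', 'e', 'r', 'a', 't', 'i', 'o', 'n', ' ', 'f', 'o', 'r']), (['g', 'o', 'a', 'l'], ['g', 'o', 'a', 'l', ' ', 'f', 'o', 'r']), (['s', 't', 'a',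 'r', 't'], ['s', 't', 'a', 'r', 't', ' ', 'v', 'a', 'l', 'u', 'e', ' ', 'f', 'o', 'r']), (['p', 'a', 't', 'h'], ['f', 'i', 'l', 'e', 's', 'y', 's', 't', 'e', 'm', ' ', 'p', 'a', 't', 'h', ' ', 'f', 'o', 'r', ' ', 't', 'h', 'e']), (['d', 'i', 'r'], ['d', 'i', 'r', 'e', 'c', 't', 'o', 'r', 'y', ' ', 'f', 'o', 'r']), (['i', 'd', 's'], ['i', 'd', 'e', 'n', 't', 'i', 'f', 'i', 'e', 'r', 's', ' ', 'f', 'o', 'r']), (['i', 'd'], ['i', 'd', 'e', 'n', 't', 'i', 'f', 'i', 'e', 'r', ' ', 'f', 'o', 'r']), (['n', 'a', 'm', 'e'], ['n', 'a', 'm', 'e', ' ', 'o', 'f']), (['n', 'a', 'm', 'e', 's'], ['n', 'a', 'm', 'e', 's', ' ', 'o', 'f']), (['s', 'e', 'e', 'd'], ['r', 'a', 'n', 'd', 'o', 'm', ' ', 's', 'e', 'e', 'd', ' ', 'f', 'o', 'r']), (['w', 'e', 'i', 'g', 'h', 't', 's'], ['w', 'e', 'i', 'g', 'h', 't', 's',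 ' ', 'f', 'o', 'r']), (['b', 'a', 's', 'e', 'l', 'i', 'n', 'e'], ['b', 'a', 's', 'e', 'l', 'i', 'n', 'e', ' ', 'd', 'a', 't', 'a', ' ', 'f', 'o', 'r']), (['c', 'o', 'u', 'n', 't'], ['c', 'o', 'u', 'n', 't', ' ', 'o', 'f'])] := PySem.Dict.ext (by decide)
      have hg : PySem.Dict.get? suffixPhrases (PySem.Chars.lower t) = none := by
        rw [hS]
        simp [PySem.Dict.get?, Ne.symm kw1, Ne.symm kw2, Ne.symm kw3, Ne.symm kw4, Ne.symm kw5, Ne.symm kw6, Ne.symm kw7, Ne.symm kw8, Ne.symm kw9, Ne.symm kw10, Ne.symm kw11, Ne.symm kw12, Ne.symm kw13, Ne.symm kw14, Ne.symm kw15, Ne.symm kw16, Ne.symm kw17, Ne.symm kw18]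
      simp [kw1, kw2, kw3, kw4, kw5, kw6, kw7, kw8, kw9, kw10, kw11, kw12, kw13, kw14, kw15, kw16, kw17, kw18, hg, fallbackB, humB_eq]

-- ===== VERDICT (by name: the statement is the Claim_ definition above) =====
theorem describe_snake_spec : Claim_equal_describe_snake := by
  intro token _
  unfold Spec_describe_snake
  exact describe_main token
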